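-- pv_equiv track=rewrite | github.com/okharkevych/leetcode_solutions | problems/1394_find_lucky_integer_in_an_array/solution.py | find_lucky
-- ===== SOURCE A (Python) =====
-- from collections import defaultdict
--
-- def find_lucky(arr: list[int]) -> int:
--     num_count: dict[int, int] = defaultdict(int)
--
--     for num in arr:
--         num_count[num] += 1
--
--     answer: int = -1
--
--     for num, count in num_count.items():
--         if num == count:
--             answer = max(answer, num)
--
--     return answer
-- ===== SOURCE B (Python) =====
-- def find_lucky(arr: list[int]) -> int:
--     s = sorted(arr)
--     answer = -1
--     run_val = None
--     run_len = 0
--     for x in s: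
--         if x == run_val:
--             run_len += 1
--         else:
--             if run_val == run_len:
--                 answer = run_val
--             run_val = x
--             run_len = 1
--     if run_val == run_len:
--         answer = run_val
--     return answer
-- ===== Notes on version B (the rewrite author's own statement) =====
-- stated objective: alternative
-- what changed: Replaces the frequency dictionary and max-scan over its items by sorting a copy of the array and walking it once, tracking run lengths; since groups come in ascending order the last lucky group is the answer.
import Mathlib
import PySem

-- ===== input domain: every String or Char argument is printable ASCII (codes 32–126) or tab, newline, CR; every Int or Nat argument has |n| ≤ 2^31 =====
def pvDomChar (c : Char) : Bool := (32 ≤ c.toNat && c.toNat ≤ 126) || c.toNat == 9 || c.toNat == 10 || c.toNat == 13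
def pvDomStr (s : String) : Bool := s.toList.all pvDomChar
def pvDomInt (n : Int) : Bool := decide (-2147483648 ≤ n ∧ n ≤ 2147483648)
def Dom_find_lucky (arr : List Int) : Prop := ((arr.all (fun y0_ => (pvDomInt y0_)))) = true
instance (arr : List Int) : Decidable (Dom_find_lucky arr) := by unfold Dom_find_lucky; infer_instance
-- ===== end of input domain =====

-- B replaces A's frequency dictionary by sorting a copy and walking its runs once (alternative
-- decomposition, same result; the input list is never mutated).

-- ===== PORT A =====
def find_lucky (arr : List Int) : Int :=
  let num_count : PySem.Dict Int Int :=
    arr.foldl (fun d num => d.modify num 0 (· + 1)) PySem.Dict.empty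
  num_count.items.foldl
    (fun answer p => if p.1 = p.2 then max answer p.1 else answer) (-1)

-- ===== PORT B =====
-- 'if run_val == run_len: answer = run_val' (None == int is False in Python)
def luckyFlush (ans : Int) (rv : Option Int) (rl : Int) : Int :=
  match rv with
  | none => ans
  | some v => if v = rl then v else ans

def luckyStep (st : Int × Option Int × Int) (x : Int) : Int × Option Int × Int :=
  match st with
  | (ans, rv, rl) =>
    if some x = rv then (ans, rv, rl + 1)
    else (luckyFlush ans rv rl, some x, 1)

def find_lucky_alt (arr : List Int) : Int :=
  let s := PySem.List.sorted arr (fun x => x) false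
  let st := s.foldl luckyStep ((-1 : Int), (none : Option Int), (0 : Int))
  luckyFlush st.1 st.2.1 st.2.2

-- ===== PRECONDITION & SPEC =====
def Spec_find_lucky (arr : List Int) (out : Int) : Prop := out = find_lucky_alt arr
instance (arr : List Int) (out : Int) : Decidable (Spec_find_lucky arr out) := by unfold Spec_find_lucky; infer_instance

-- ===== CLAIM (what is proved, stated in full; the proofs are below) =====
def Claim_equal_find_lucky : Prop := ∀ (arr : List Int), Dom_find_lucky arr → Spec_find_lucky arr (find_lucky arr)

-- ===== LEMMAS AND PROOFS =====

def luckyFinish (st : Int × Option Int × Int) : Int := luckyFlush st.1 st.2.1 st.2.2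

-- the ascending blocks decomposition of sorted(arr)
def luckyBlocks (arr D : List Int) : List Int :=
  D.flatMap (fun v => List.replicate (arr.count v) v)

-- the group-level fold both sides reduce to ("set" version, used by B's side)
def luckySet (arr : List Int) (ans v : Int) : Int :=
  if v = (arr.count v : Int) then v else ans

theorem luckyBlocks_cons (arr v : _) (rest : List Int) :
    luckyBlocks arr (v :: rest) = List.replicate (arr.count v) v ++ luckyBlocks arr rest := by
  simp [luckyBlocks]

theorem count_luckyBlocks (arr : List Int) (x : Int) :
    ∀ D : List Int, D.Nodup → (luckyBlocks arr D).count x = if x ∈ D then arr.count x else 0 := by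
  intro D
  induction D with
  | nil => intro _; simp [luckyBlocks]
  | cons v rest ih =>
    intro hD
    obtain ⟨hv, hrest⟩ := List.nodup_cons.mp hD
    rw [luckyBlocks_cons, List.count_append, ih hrest]
    by_cases hxv : x = v
    · subst hxv
      simp [hv]
    · simp [List.count_replicate, Ne.symm hxv, List.mem_cons, hxv]

theorem perm_luckyBlocks (arr : List Int) :
    (luckyBlocks arr (PySem.List.sorted (PySem.Set.ofList arr) (fun x => x) false)).Perm arr := by
  set D := PySem.List.sorted (PySem.Set.ofList arr) (fun x => x) false with hDdef
  have hnd : D.Nodup := (PySem.List.sorted_perm _ _ _).nodup_iff.mpr (PySem.Set.nodup_ofList arr)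
  have hmem : ∀ x : Int, x ∈ D ↔ x ∈ arr := by
    intro x
    rw [hDdef, (PySem.List.sorted_perm _ _ _).mem_iff, PySem.Set.mem_ofList]
  rw [List.perm_iff_count]
  intro x
  rw [count_luckyBlocks arr x D hnd]
  by_cases hx : x ∈ D
  · simp [hx]
  · simp [hx, List.count_eq_zero.mpr (fun h => hx ((hmem x).mpr h))]

theorem mem_luckyBlocks {arr D : List Int} {x : Int} (h : x ∈ luckyBlocks arr D) : x ∈ D := by
  simp only [luckyBlocks, List.mem_flatMap] at h
  obtain ⟨v, hv, hx⟩ := h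
  rwa [List.eq_of_mem_replicate hx]

theorem pairwise_luckyBlocks (arr : List Int) :
    ∀ D : List Int, D.Pairwise (· < ·) → (luckyBlocks arr D).Pairwise (· ≤ ·) := by
  intro D
  induction D with
  | nil => intro _; simp [luckyBlocks]
  | cons v rest ih =>
    intro hD
    obtain ⟨hv, hrest⟩ := List.pairwise_cons.mp hD
    rw [luckyBlocks_cons, List.pairwise_append]
    refine ⟨List.pairwise_replicate.mpr (Or.inr le_rfl), ih hrest, ?_⟩
    intro a ha b hb
    rw [List.eq_of_mem_replicate ha]
    exact le_of_lt (hv b (mem_luckyBlocks hb))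

theorem sorted_eq_luckyBlocks (arr : List Int) :
    PySem.List.sorted arr (fun x => x) false
      = luckyBlocks arr (PySem.List.sorted (PySem.Set.ofList arr) (fun x => x) false) :=
  PySem.List.sorted_id_eq_of_perm_of_pairwise _ _
    (perm_luckyBlocks arr)
    (pairwise_luckyBlocks arr _ (PySem.List.sorted_ofList_pairwise_lt arr))

-- walking a run of equal values only increments the run length
theorem foldl_luckyStep_replicate_same (v ans : Int) (m : Nat) :
    ∀ rl : Int, (List.replicate m v).foldl luckyStep (ans, some v, rl) = (ans, some v, rl + m) := by
  induction m with
  | zero => intro rl; simp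
  | succ k ih =>
    intro rl
    rw [List.replicate_succ, List.foldl_cons]
    have h1 : luckyStep (ans, some v, rl) v = (ans, some v, rl + 1) := by simp [luckyStep]
    rw [h1, ih (rl + 1)]
    simp only [Prod.mk.injEq, true_and]
    push_cast
    ring

-- entering a fresh nonempty run flushes the previous one
theorem foldl_luckyStep_replicate_new (v ans : Int) (rv : Option Int) (rl : Int)
    {m : Nat} (hm : 1 ≤ m) (hne : some v ≠ rv) :
    (List.replicate m v).foldl luckyStep (ans, rv, rl)
      = (luckyFlush ans rv rl, some v, (m : Int)) := by
  obtain ⟨k, rfl⟩ := Nat.exists_eq_add_of_le hm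
  rw [Nat.add_comm 1 k, List.replicate_succ, List.foldl_cons]
  have h1 : luckyStep (ans, rv, rl) v = (luckyFlush ans rv rl, some v, 1) := by
    simp [luckyStep, hne]
  rw [h1, foldl_luckyStep_replicate_same]
  simp only [Prod.mk.injEq, true_and]
  push_cast
  ring

-- main invariant: the run walk over the blocks of D computes the group-level fold over D
theorem walk_blocks (arr : List Int) :
    ∀ D : List Int, D.Pairwise (· < ·) → (∀ v ∈ D, 1 ≤ arr.count v) →
    ∀ (ans : Int) (rv : Option Int) (rl : Int), (∀ v ∈ D, some v ≠ rv) →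
    luckyFinish ((luckyBlocks arr D).foldl luckyStep (ans, rv, rl))
      = D.foldl (luckySet arr) (luckyFlush ans rv rl) := by
  intro D
  induction D with
  | nil => intro _ _ ans rv rl _; simp [luckyBlocks, luckyFinish]
  | cons v rest ih =>
    intro hD hcnt ans rv rl hfresh
    obtain ⟨hv, hrest⟩ := List.pairwise_cons.mp hD
    rw [luckyBlocks_cons, List.foldl_append,
        foldl_luckyStep_replicate_new v ans rv rl (hcnt v (by simp)) (hfresh v (by simp)),
        ih hrest (fun u hu => hcnt u (List.mem_cons_of_mem _ hu)) _ _ _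
          (fun u hu => by simpa using (hv u hu).ne')]
    rw [List.foldl_cons]
    congr 1

-- B computes the group-level fold over the ascending distinct values
theorem alt_eq_groupFold (arr : List Int) :
    find_lucky_alt arr
      = (PySem.List.sorted (PySem.Set.ofList arr) (fun x => x) false).foldl (luckySet arr) (-1) := by
  set D := PySem.List.sorted (PySem.Set.ofList arr) (fun x => x) false with hDdef
  have hmem : ∀ x : Int, x ∈ D ↔ x ∈ arr := by
    intro x
    rw [hDdef, (PySem.List.sorted_perm _ _ _).mem_iff, PySem.Set.mem_ofList]
  have hcnt : ∀ v ∈ D, 1 ≤ arr.count v := fun v hv => List.count_pos_iff.mpr ((hmem v).mp hv)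
  have hwalk := walk_blocks arr D (PySem.List.sorted_ofList_pairwise_lt arr) hcnt
    (-1) none 0 (fun v _ => by simp)
  show luckyFinish ((PySem.List.sorted arr (fun x => x) false).foldl luckyStep (-1, none, 0)) = _
  rw [sorted_eq_luckyBlocks arr, ← hDdef, hwalk]
  rfl

-- A computes the max-fold over the distinct values in first-occurrence order
theorem a_eq_maxFold (arr : List Int) :
    find_lucky arr
      = (PySem.Set.ofList arr).foldl
          (fun answer k => if k = (arr.count k : Int) then max answer k else answer) (-1) := by
  show (arr.foldl (fun d num => d.modify num 0 (· + 1)) PySem.Dict.empty).items.foldl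
      (fun answer p => if p.1 = p.2 then max answer p.1 else answer) (-1) = _
  rw [← PySem.Dict.counter_eq_foldl, PySem.Dict.items_counter, List.foldl_map]

-- on a strictly increasing list whose lucky values all dominate ans, "set" and "max" coincide
theorem set_eq_max_fold (arr : List Int) :
    ∀ (D : List Int) (ans : Int), D.Pairwise (· < ·) →
    (∀ v ∈ D, v = (arr.count v : Int) → ans ≤ v) →
    D.foldl (fun answer k => if k = (arr.count k : Int) then max answer k else answer) ans
      = D.foldl (luckySet arr) ans := by
  intro D
  induction D with
  | nil => intro ans _ _; rfl
  | cons v rest ih =>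
    intro ans hD hdom
    obtain ⟨hv, hrest⟩ := List.pairwise_cons.mp hD
    simp only [List.foldl_cons, luckySet]
    by_cases hl : v = (arr.count v : Int)
    · rw [if_pos hl, if_pos hl, max_eq_right (hdom v (by simp) hl)]
      exact ih v hrest (fun u hu _ => le_of_lt (hv u hu))
    · rw [if_neg hl, if_neg hl]
      exact ih ans hrest (fun u hu h => hdom u (List.mem_cons_of_mem _ hu) h)

-- the max-fold is invariant under permutation of the value list
theorem maxFold_perm (arr : List Int) {D1 D2 : List Int} (p : D1.Perm D2) (ans : Int) :
    D1.foldl (fun answer k => if k = (arr.count k : Int) then max answer k else answer) ans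
      = D2.foldl (fun answer k => if k = (arr.count k : Int) then max answer k else answer) ans := by
  refine p.foldl_eq' ?_ ans
  intro x _ y _ z
  by_cases hx : x = (arr.count x : Int) <;> by_cases hy : y = (arr.count y : Int)
  · simp only [if_pos hx, if_pos hy]
    exact max_right_comm z x y
  · simp only [if_pos hx, if_neg hy]
  · simp only [if_neg hx, if_pos hy]
  · simp only [if_neg hx, if_neg hy]

-- ===== VERDICT (by name: the statement is the Claim_ definition above) =====
theorem find_lucky_spec : Claim_equal_find_lucky := by
  intro arr _
  show find_lucky arr = find_lucky_alt arr
  set D := PySem.List.sorted (PySem.Set.ofList arr) (fun x => x) false with hDdef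
  have hmem : ∀ x : Int, x ∈ D ↔ x ∈ arr := by
    intro x
    rw [hDdef, (PySem.List.sorted_perm _ _ _).mem_iff, PySem.Set.mem_ofList]
  rw [a_eq_maxFold, alt_eq_groupFold,
      maxFold_perm arr ((PySem.List.sorted_perm (PySem.Set.ofList arr) (fun x => x) false).symm) (-1),
      ← hDdef]
  refine set_eq_max_fold arr D (-1) (PySem.List.sorted_ofList_pairwise_lt arr) ?_
  intro v hv heq
  have : 1 ≤ arr.count v := List.count_pos_iff.mpr ((hmem v).mp hv)
  omega
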